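-- pv_equiv track=rewrite | github.com/Viktorgild/Projekt | src/transactions.py | sort_operations_by_currency
-- ===== SOURCE A (Python) =====
-- def sort_operations_by_currency(operations):
--     sorted_operations = {}
--     for op in operations:
--         currency = op["currency"]
--         if currency not in sorted_operations:
--             sorted_operations[currency] = [op]
--         else:
--             sorted_operations[currency].append(op)
--     return list(sorted_operations.values())
-- ===== SOURCE B (Python) =====
-- def sort_operations_by_currency(operations):
--     currencies = []
--     for op in operations:
--         c = op["currency"]
--         if c not in currencies:
--             currencies.append(c)
--     return [[op for op in operations if op["currency"] == c] for c in currencies]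
-- ===== Notes on version B (the rewrite author's own statement) =====
-- stated objective: alternative
-- what changed: Replaces the single accumulating dict-of-lists pass by an index-then-scan strategy: one pass collects the distinct currencies in first-seen order, then each group is rebuilt by filtering the whole input per currency.
import Mathlib
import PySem

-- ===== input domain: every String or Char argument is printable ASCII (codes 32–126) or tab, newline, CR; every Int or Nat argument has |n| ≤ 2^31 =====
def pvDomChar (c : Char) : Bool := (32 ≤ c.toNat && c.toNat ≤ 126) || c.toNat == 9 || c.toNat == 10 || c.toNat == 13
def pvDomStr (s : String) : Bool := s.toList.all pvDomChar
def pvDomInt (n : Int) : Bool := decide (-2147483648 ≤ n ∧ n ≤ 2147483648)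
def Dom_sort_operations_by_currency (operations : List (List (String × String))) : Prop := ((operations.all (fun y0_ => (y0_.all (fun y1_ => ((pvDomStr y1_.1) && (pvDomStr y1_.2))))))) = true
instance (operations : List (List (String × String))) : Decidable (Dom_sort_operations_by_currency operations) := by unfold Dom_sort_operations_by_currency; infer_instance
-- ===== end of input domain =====

-- B groups by a different strategy: one pass listing the distinct currencies in first-seen
-- order, then one filtering scan of the whole input per currency; return value only.

-- ===== PORT A =====
-- op["currency"] raises KeyError when absent; Pre_ excludes that, so getD's default "" is never read inside Pre_.
def sort_operations_by_currency (operations : List (List (String × String))) : List (List (List (String × String))) :=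
  (operations.foldl (fun d op =>
      let currency := (PySem.Dict.mk op).getD "currency" ""
      if d.contains currency = false then d.insert currency [op]
      else d.modify currency [] (fun l => l ++ [op]))
    PySem.Dict.empty).values

-- ===== PORT B =====
def sort_operations_by_currency_alt (operations : List (List (String × String))) : List (List (List (String × String))) :=
  let currencies := operations.foldl (fun cs op =>
      let c := (PySem.Dict.mk op).getD "currency" ""
      if c ∈ cs then cs else cs ++ [c]) []
  currencies.map (fun c => operations.filter (fun op => (PySem.Dict.mk op).getD "currency" "" == c))

-- ===== PRECONDITION & SPEC =====
-- Pre_ excludes exactly the inputs where some operation lacks a "currency" key, on which the Python A raises KeyError.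
def Pre_sort_operations_by_currency (operations : List (List (String × String))) : Prop :=
  ∀ op ∈ operations, (PySem.Dict.mk op).contains "currency" = true
instance (operations : List (List (String × String))) : Decidable (Pre_sort_operations_by_currency operations) := by unfold Pre_sort_operations_by_currency; infer_instance
def pvWitness_sort_operations_by_currency : (List (List (String × String))) :=
  [[("currency", "USD"), ("amount", "5")], [("currency", "EUR")], [("currency", "USD"), ("amount", "7")]]

def Spec_sort_operations_by_currency (operations : List (List (String × String))) (out : List (List (List (String × String)))) : Prop := out = sort_operations_by_currency_alt operations
instance (operations : List (List (String × String))) (out : List (List (List (String × String)))) : Decidable (Spec_sort_operations_by_currency operations out) := by unfold Spec_sort_operations_by_currency; infer_instance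

-- ===== CLAIM (what is proved, stated in full; the proofs are below) =====
def Claim_equal_sort_operations_by_currency : Prop := ∀ (operations : List (List (String × String))), Dom_sort_operations_by_currency operations → Pre_sort_operations_by_currency operations → Spec_sort_operations_by_currency operations (sort_operations_by_currency operations)

-- ===== LEMMAS AND PROOFS =====

-- the key A and B both read from an operation
def pvKey (op : List (String × String)) : String := (PySem.Dict.mk op).getD "currency" ""

-- A's loop step is a single modify-append, in both branches
lemma stepA_eq_modify (d : PySem.Dict String (List (List (String × String)))) (op : List (String × String)) :
    (if d.contains (pvKey op) = false then d.insert (pvKey op) [op]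
     else d.modify (pvKey op) [] (fun l => l ++ [op]))
    = d.modify (pvKey op) [] (fun l => l ++ [op]) := by
  by_cases h : d.contains (pvKey op) = false
  · simp only [h, if_true]
    have h0 : d.getD (pvKey op) [] = [] := by
      rw [PySem.Dict.getD_eq_get?_getD]
      have := PySem.Dict.get?_eq_none_iff_contains (d := d) (k := pvKey op)
      simp [this.mpr h]
    simp [PySem.Dict.modify, h0]
  · simp [h]

lemma foldA_eq (operations : List (List (String × String))) :
    (operations.foldl (fun d op =>
        let currency := (PySem.Dict.mk op).getD "currency" ""
        if d.contains currency = false then d.insert currency [op]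
        else d.modify currency [] (fun l => l ++ [op]))
      PySem.Dict.empty)
    = (operations.map (fun op => (pvKey op, op))).foldl
        (fun d p => d.modify p.1 [] (fun l => l ++ [p.2])) PySem.Dict.empty := by
  rw [List.foldl_map]
  apply PySem.List.foldl_congr_mem
  intro d op _
  exact stepA_eq_modify d op

lemma foldB_eq (operations : List (List (String × String))) :
    (operations.foldl (fun cs op =>
        let c := (PySem.Dict.mk op).getD "currency" ""
        if c ∈ cs then cs else cs ++ [c]) [])
    = PySem.Set.ofList (operations.map pvKey) := by
  rw [← PySem.Set.update_empty, PySem.Set.update_map_eq_foldl_add]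
  apply PySem.List.foldl_congr_mem
  intro cs op _
  rw [PySem.Set.add_eq_ite]
  rfl

-- ===== VERDICT (by name: the statement is the Claim_ definition above) =====
theorem sort_operations_by_currency_spec : Claim_equal_sort_operations_by_currency := by
  intro operations _ _
  unfold Spec_sort_operations_by_currency sort_operations_by_currency sort_operations_by_currency_alt
  rw [foldA_eq, foldB_eq]
  set pairs := operations.map (fun op => (pvKey op, op)) with hpairs
  set D := pairs.foldl (fun d p => d.modify p.1 [] (fun l => l ++ [p.2])) PySem.Dict.empty with hD
  have hnd : D.keys.Nodup := by
    rw [hD]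
    exact PySem.Dict.nodup_keys_foldl_modify_key pairs Prod.fst [] _ _ PySem.Dict.nodup_keys_empty
  have hkeys : D.keys = PySem.Set.ofList (operations.map pvKey) := by
    rw [hD]
    rw [PySem.Dict.keys_foldl_modify_key]
    rw [hpairs, List.map_map]
    rfl
  rw [PySem.Dict.values_eq_map_keys D hnd [], hkeys]
  apply List.map_congr_left
  intro c _
  have hget : D.getD c [] = (pairs.filter (fun p => p.1 == c)).map (·.2) := by
    rw [hD, PySem.Dict.getD_foldl_modify_append]
    simp
  rw [hget, hpairs, List.filter_map, List.map_map]
  simp [Function.comp_def, pvKey]
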